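-- pv_equiv track=rewrite | github.com/qwerasdzx-123/crypto_gui | base_encoding.py | _base91_92_encode
-- ===== SOURCE A (Python) =====
-- def _base91_92_encode(text: str, chars: str, base: int) -> str:
--     b = 0
--     n = 0
--     out = []
--     for c in text.encode('utf-8'):
--         b |= c << n
--         n += 8
--         if n > 13:
--             v = b & 8191
--             if v > 88:
--                 b >>= 13
--                 n -= 13
--             else:
--                 v = b & 16383
--                 b >>= 14
--                 n -= 14
--             out.append(chars[v % base])
--             out.append(chars[v // base])
--     if n > 0:
--         out.append(chars[b % base])
--         if n > 7 or b > base - 1: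
--             out.append(chars[b // base])
--     return ''.join(out)
-- ===== SOURCE B (Python) =====
-- def _base91_92_encode(text: str, chars: str, base: int) -> str:
--     data = text.encode('utf-8')
--     b = int.from_bytes(data, 'little')
--     n = 8 * len(data)
--     out = []
--     while n > 13:
--         v = b & 8191
--         if v > 88:
--             b >>= 13
--             n -= 13
--         else:
--             v = b & 16383
--             b >>= 14
--             n -= 14
--         out.append(chars[v % base])
--         out.append(chars[v // base])
--     if n > 0:
--         out.append(chars[b % base])
--         if n > 7 or b > base - 1:
--             out.append(chars[b // base])
--     return ''.join(out)
-- ===== Notes on version B (the rewrite author's own statement) =====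
-- stated objective: alternative
-- what changed: B builds the whole bit buffer up front as one little-endian integer (int.from_bytes) and drains it with a single while-loop, instead of A's per-byte for-loop that interleaves accumulation with at-most-one extraction per byte.
import Mathlib
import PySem

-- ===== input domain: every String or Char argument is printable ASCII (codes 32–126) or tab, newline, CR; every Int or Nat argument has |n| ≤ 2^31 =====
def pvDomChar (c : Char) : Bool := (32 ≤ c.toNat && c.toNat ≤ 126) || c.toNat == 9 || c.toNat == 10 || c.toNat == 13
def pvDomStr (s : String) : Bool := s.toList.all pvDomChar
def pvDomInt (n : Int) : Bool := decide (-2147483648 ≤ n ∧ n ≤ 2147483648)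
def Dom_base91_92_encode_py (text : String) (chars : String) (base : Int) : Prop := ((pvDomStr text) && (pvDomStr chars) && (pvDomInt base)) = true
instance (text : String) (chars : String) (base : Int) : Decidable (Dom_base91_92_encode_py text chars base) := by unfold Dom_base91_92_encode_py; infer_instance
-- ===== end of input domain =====

-- B separates accumulation (one big little-endian integer) from extraction (a single while-loop
-- over that integer) where A interleaves them per input byte; objective: alternative decomposition.
-- In the Python, `b` and `n` are nonnegative throughout (bytes, bit counts), so both ports carry
-- them as Nat; `text.encode('utf-8')` is ported as the list of code points, exact on the ASCII Dom.

-- ===== PORT A =====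
-- one iteration of A's `for c in text.encode('utf-8')` body, state (b, n, out)
def aByteStep (chars : List Char) (base : Int) (s : Nat × Nat × List Char) (c : Nat) : Nat × Nat × List Char :=
  let b := s.1 ||| (c <<< s.2.1)
  let n := s.2.1 + 8
  if 13 < n then
    let v := b &&& 8191
    let vbn := if 88 < v then (v, b >>> 13, n - 13) else (b &&& 16383, b >>> 14, n - 14)
    (vbn.2.1, vbn.2.2,
      s.2.2 ++ [PySem.List.pyGetD chars (PySem.Int.mod (vbn.1 : Int) base) ' ',
                PySem.List.pyGetD chars (PySem.Int.floordiv (vbn.1 : Int) base) ' '])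
  else (b, n, s.2.2)

def base91_92_encode_py (text : String) (chars : String) (base : Int) : String :=
  let data := text.toList.map Char.toNat
  let s := data.foldl (aByteStep chars.toList base) (0, 0, [])
  let out :=
    if 0 < s.2.1 then
      let out := s.2.2 ++ [PySem.List.pyGetD chars.toList (PySem.Int.mod (s.1 : Int) base) ' ']
      if 7 < s.2.1 ∨ (s.1 : Int) > base - 1 then
        out ++ [PySem.List.pyGetD chars.toList (PySem.Int.floordiv (s.1 : Int) base) ' ']
      else out
    else s.2.2
  String.ofList out

-- ===== PORT B =====
-- int.from_bytes(data, 'little')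
def bigOf (data : List Nat) : Nat := data.foldr (fun c acc => c + 256 * acc) 0

-- B's `while n > 13` extraction loop over the one big integer
def extLoop (chars : List Char) (base : Int) (b n : Nat) (out : List Char) : Nat × Nat × List Char :=
  if _h : 13 < n then
    let v := b &&& 8191
    if 88 < v then
      extLoop chars base (b >>> 13) (n - 13)
        (out ++ [PySem.List.pyGetD chars (PySem.Int.mod (v : Int) base) ' ',
                 PySem.List.pyGetD chars (PySem.Int.floordiv (v : Int) base) ' '])
    else
      let v2 := b &&& 16383
      extLoop chars base (b >>> 14) (n - 14)
        (out ++ [PySem.List.pyGetD chars (PySem.Int.mod (v2 : Int) base) ' ',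
                 PySem.List.pyGetD chars (PySem.Int.floordiv (v2 : Int) base) ' '])
  else (b, n, out)
termination_by n
decreasing_by all_goals omega

def base91_92_encode_py_alt (text : String) (chars : String) (base : Int) : String :=
  let data := text.toList.map Char.toNat
  let s := extLoop chars.toList base (bigOf data) (8 * data.length) []
  let out :=
    if 0 < s.2.1 then
      let out := s.2.2 ++ [PySem.List.pyGetD chars.toList (PySem.Int.mod (s.1 : Int) base) ' ']
      if 7 < s.2.1 ∨ (s.1 : Int) > base - 1 then
        out ++ [PySem.List.pyGetD chars.toList (PySem.Int.floordiv (s.1 : Int) base) ' ']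
      else out
    else s.2.2
  String.ofList out

-- ===== PRECONDITION & SPEC =====
-- Pre_ excludes inputs where A raises (ZeroDivisionError for base = 0, IndexError for a
-- non-positive base via negative-index wraparound or for a `chars` too short for the indices
-- v % base, v // base ≤ 8280 // base); it is a sufficient closed-form bound, so it also drops
-- rare lucky inputs where a short `chars` happens to cover every index that actually occurs
-- (see the cite in claim.json); empty text always returns '' and is kept for every base/chars.
def Pre_base91_92_encode_py (text : String) (chars : String) (base : Int) : Prop :=
  text = "" ∨ (1 ≤ base ∧ base ≤ (chars.toList.length : Int) ∧ 8280 / base < (chars.toList.length : Int))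
instance (text : String) (chars : String) (base : Int) : Decidable (Pre_base91_92_encode_py text chars base) := by unfold Pre_base91_92_encode_py; infer_instance

def pvWitness_base91_92_encode_py : String × String × Int :=
  ("Hi!", "ABCDEFGHIJKLMNOPQRSTUVWXYZabcdefghijklmnopqrstuvwxyz0123456789!#$%&()*+,./:;<=>?@[]^_`{|}~\"'", 91)

def Spec_base91_92_encode_py (text : String) (chars : String) (base : Int) (out : String) : Prop := out = base91_92_encode_py_alt text chars base
instance (text : String) (chars : String) (base : Int) (out : String) : Decidable (Spec_base91_92_encode_py text chars base out) := by unfold Spec_base91_92_encode_py; infer_instance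

-- ===== CLAIM (what is proved, stated in full; the proofs are below) =====
def Claim_equal_base91_92_encode_py : Prop := ∀ (text : String) (chars : String) (base : Int), Dom_base91_92_encode_py text chars base → Pre_base91_92_encode_py text chars base → Spec_base91_92_encode_py text chars base (base91_92_encode_py text chars base)

-- ===== LEMMAS AND PROOFS =====

theorem and_8191_eq (x : Nat) : x &&& 8191 = x % 8192 := by
  have h := Nat.and_two_pow_sub_one_eq_mod x 13
  norm_num at h
  exact h

theorem and_16383_eq (x : Nat) : x &&& 16383 = x % 16384 := by
  have h := Nat.and_two_pow_sub_one_eq_mod x 14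
  norm_num at h
  exact h

theorem lor_shift_add (b c k : Nat) (h : b < 2 ^ k) : b ||| (c <<< k) = b + c * 2 ^ k := by
  apply Nat.eq_of_testBit_eq
  intro j
  rw [show b + c * 2 ^ k = 2 ^ k * c + b by ring, Nat.testBit_two_pow_mul_add c h j,
    Nat.testBit_lor, Nat.testBit_shiftLeft]
  by_cases hj : j < k
  · simp [hj, show ¬ (k ≤ j) by omega]
  · have hbj : b.testBit j = false :=
      Nat.testBit_lt_two_pow (lt_of_lt_of_le h (Nat.pow_le_pow_right (by norm_num) (by omega)))
    simp [hj, hbj, Nat.le_of_not_lt hj]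

theorem low_mod (b1 big K k m : Nat) (hk : k ≤ K) (hm : m = 2 ^ k) :
    (b1 + big * 2 ^ K) % m = b1 % m := by
  subst hm
  rw [show (2:Nat) ^ K = 2 ^ k * 2 ^ (K - k) by rw [← pow_add]; congr 1; omega,
    show b1 + big * (2 ^ k * 2 ^ (K - k)) = b1 + big * 2 ^ (K - k) * 2 ^ k by ring,
    Nat.add_mul_mod_self_right]

theorem low_div (b1 big K k m : Nat) (hk : k ≤ K) (hm : m = 2 ^ k) :
    (b1 + big * 2 ^ K) / m = b1 / m + big * 2 ^ (K - k) := by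
  subst hm
  rw [show (2:Nat) ^ K = 2 ^ k * 2 ^ (K - k) by rw [← pow_add]; congr 1; omega,
    show b1 + big * (2 ^ k * 2 ^ (K - k)) = b1 + big * 2 ^ (K - k) * 2 ^ k by ring,
    Nat.add_mul_div_right _ _ (Nat.two_pow_pos k)]

-- the core invariant: B's extraction loop on the whole remaining integer equals A's
-- byte-at-a-time fold, for any boundary state (b, n) with n ≤ 13 and b < 2^n
theorem ext_eq_fold (chars : List Char) (base : Int) :
    ∀ (cs : List Nat) (b n : Nat) (out : List Char), (∀ c ∈ cs, c < 256) → n ≤ 13 → b < 2 ^ n →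
    extLoop chars base (b + bigOf cs * 2 ^ n) (n + 8 * cs.length) out
      = cs.foldl (aByteStep chars base) (b, n, out) := by
  intro cs
  induction cs with
  | nil =>
    intro b n out _ hn _
    simp only [bigOf, List.foldr_nil, List.foldl_nil, List.length_nil, Nat.mul_zero,
      Nat.add_zero, Nat.zero_mul]
    rw [extLoop]
    simp [show ¬ 13 < n by omega]
  | cons c cs ih =>
    intro b n out hcs hn hb
    have hc : c < 256 := hcs c (by simp)
    have hcs' : ∀ x ∈ cs, x < 256 := fun x hx => hcs x (by simp [hx])
    have hbig : bigOf (c :: cs) = c + 256 * bigOf cs := rfl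
    have hpow : (2:Nat) ^ (n + 8) = 2 ^ n * 256 := by rw [pow_add]; norm_num
    have hb1 : b + c * 2 ^ n < 2 ^ (n + 8) := by
      rw [hpow]; nlinarith [Nat.two_pow_pos n]
    have harg : b + bigOf (c :: cs) * 2 ^ n
        = (b + c * 2 ^ n) + bigOf cs * 2 ^ (n + 8) := by rw [hbig, hpow]; ring
    have hlen : n + 8 * (c :: cs).length = (n + 8) + 8 * cs.length := by
      simp [List.length_cons]; ring
    rw [List.foldl_cons, harg, hlen]
    by_cases h13 : 13 < n + 8
    · -- A extracts this round; B's loop takes one matching step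
      have hK : 13 ≤ n + 8 := by omega
      have hvlow : ((b + c * 2 ^ n) + bigOf cs * 2 ^ (n + 8)) &&& 8191
          = (b + c * 2 ^ n) &&& 8191 := by
        rw [and_8191_eq, and_8191_eq, low_mod _ _ _ 13 _ (by omega) (by norm_num)]
      rw [extLoop]
      simp only [show 13 < (n + 8) + 8 * cs.length by omega, dite_true, hvlow]
      simp only [aByteStep, lor_shift_add b c n hb]
      by_cases hv : 88 < (b + c * 2 ^ n) &&& 8191
      · simp only [hv, if_pos, h13]
        have hsh : ((b + c * 2 ^ n) + bigOf cs * 2 ^ (n + 8)) >>> 13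
            = ((b + c * 2 ^ n) >>> 13) + bigOf cs * 2 ^ ((n + 8) - 13) := by
          rw [Nat.shiftRight_eq_div_pow, Nat.shiftRight_eq_div_pow,
            low_div _ _ _ 13 _ (by omega) rfl]
        rw [hsh]
        have hb2 : (b + c * 2 ^ n) >>> 13 < 2 ^ ((n + 8) - 13) := by
          rw [Nat.shiftRight_eq_div_pow]
          apply Nat.div_lt_of_lt_mul
          calc b + c * 2 ^ n < 2 ^ (n + 8) := hb1
            _ = 2 ^ 13 * 2 ^ ((n + 8) - 13) := by rw [← pow_add]; congr 1; omega
        have := ih ((b + c * 2 ^ n) >>> 13) ((n + 8) - 13)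
          (out ++ [PySem.List.pyGetD chars (PySem.Int.mod (((b + c * 2 ^ n) &&& 8191 : Nat) : Int) base) ' ',
                   PySem.List.pyGetD chars (PySem.Int.floordiv (((b + c * 2 ^ n) &&& 8191 : Nat) : Int) base) ' '])
          hcs' (by omega) hb2
        rw [show (n + 8) + 8 * cs.length - 13 = ((n + 8) - 13) + 8 * cs.length by omega]
        exact this
      · simp only [hv, if_false, h13, if_pos]
        have hvlow2 : ((b + c * 2 ^ n) + bigOf cs * 2 ^ (n + 8)) &&& 16383
            = (b + c * 2 ^ n) &&& 16383 := by
          rw [and_16383_eq, and_16383_eq, low_mod _ _ _ 14 _ (by omega) (by norm_num)]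
        rw [hvlow2]
        have hsh : ((b + c * 2 ^ n) + bigOf cs * 2 ^ (n + 8)) >>> 14
            = ((b + c * 2 ^ n) >>> 14) + bigOf cs * 2 ^ ((n + 8) - 14) := by
          rw [Nat.shiftRight_eq_div_pow, Nat.shiftRight_eq_div_pow,
            low_div _ _ _ 14 _ (by omega) rfl]
        rw [hsh]
        have hb2 : (b + c * 2 ^ n) >>> 14 < 2 ^ ((n + 8) - 14) := by
          rw [Nat.shiftRight_eq_div_pow]
          apply Nat.div_lt_of_lt_mul
          calc b + c * 2 ^ n < 2 ^ (n + 8) := hb1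
            _ = 2 ^ 14 * 2 ^ ((n + 8) - 14) := by rw [← pow_add]; congr 1; omega
        have := ih ((b + c * 2 ^ n) >>> 14) ((n + 8) - 14)
          (out ++ [PySem.List.pyGetD chars (PySem.Int.mod (((b + c * 2 ^ n) &&& 16383 : Nat) : Int) base) ' ',
                   PySem.List.pyGetD chars (PySem.Int.floordiv (((b + c * 2 ^ n) &&& 16383 : Nat) : Int) base) ' '])
          hcs' (by omega) hb2
        rw [show (n + 8) + 8 * cs.length - 14 = ((n + 8) - 14) + 8 * cs.length by omega]
        exact this
    · -- n + 8 ≤ 13: A just accumulates; the new byte sits inside the big integer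
      simp only [aByteStep, lor_shift_add b c n hb, h13, if_false]
      exact ih (b + c * 2 ^ n) (n + 8) out hcs' (by omega) hb1

-- ===== VERDICT (by name: the statement is the Claim_ definition above) =====
theorem base91_92_encode_py_spec : Claim_equal_base91_92_encode_py := by
  intro text chars base hdom _
  have hbytes : ∀ c ∈ text.toList.map Char.toNat, c < 256 := by
    intro c hc
    simp only [List.mem_map] at hc
    obtain ⟨ch, hch, rfl⟩ := hc
    unfold Dom_base91_92_encode_py at hdom
    simp only [Bool.and_eq_true] at hdom
    have := hdom.1.1
    unfold pvDomStr at this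
    rw [List.all_eq_true] at this
    have h2 := this ch hch
    unfold pvDomChar at h2
    simp only [Bool.or_eq_true, Bool.and_eq_true, decide_eq_true_eq, beq_iff_eq] at h2
    omega
  unfold Spec_base91_92_encode_py
  simp only [base91_92_encode_py, base91_92_encode_py_alt]
  have hstate : extLoop chars.toList base (bigOf (text.toList.map Char.toNat))
      (8 * (text.toList.map Char.toNat).length) []
      = (text.toList.map Char.toNat).foldl (aByteStep chars.toList base) (0, 0, []) := by
    have h := ext_eq_fold chars.toList base (text.toList.map Char.toNat) 0 0 []
      hbytes (by norm_num) (by norm_num)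
    simpa using h
  rw [hstate]
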